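-- pv_equiv track=rewrite | github.com/Gitae-business/CodingTest | BJ_17135.py | get_max_killed_enemies
-- ===== SOURCE A (Python) =====
-- from itertools import combinations
--
-- def get_max_killed_enemies(N, M, D, original_board):
--     max_killed = 0
--
--     for archer_positions in combinations(range(M), 3):
--         board = [row[:] for row in original_board]
--         killed_count = 0
--
--         for _ in range(N):
--             targets = set()
--
--             for archer_pos in archer_positions:
--                 min_dist = float('inf')
--                 target = None
--
--                 for r in range(N - 1, -1, -1):
--                     for c in range(M - 1, -1, -1):
--                         if board[r][c] == 1:
--                             dist = abs(N - r) + abs(archer_pos - c)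
--
--                             if dist <= D:
--                                 if dist < min_dist:
--                                     min_dist = dist
--                                     target = (r, c)
--                                 elif dist == min_dist:
--                                     if target is None or c < target[1]:
--                                         target = (r, c)
--
--                 if target is not None:
--                     targets.add(target)
--
--             for r, c in targets:
--                 if board[r][c] == 1:
--                     board[r][c] = 0
--                     killed_count += 1
--
--             if _ < N - 1:
--                 pass
--
--             new_board = [[0] * M for _ in range(N)]
--             for r in range(N):
--                 for c in range(M):
--                     if board[r][c] == 1 and r + 1 < N:
--                         new_board[r+1][c] = 1
--             board = new_board
--
--         max_killed = max(max_killed, killed_count)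
--     return max_killed
-- ===== SOURCE B (Python) =====
-- from itertools import combinations
--
-- def get_max_killed_enemies(N, M, D, original_board):
--     if M < 3:
--         return 0
--     # Enemies kept as a coordinate list instead of a grid: an enemy starting at
--     # row r stands on row r + t during turn t and has left the board once
--     # r + t >= N, so no board copying, no shifting, no full-grid scanning.
--     enemies = [(r, c) for r in range(N) for c in range(M)
--                if original_board[r][c] == 1]
--     best = 0
--     for archers in combinations(range(M), 3):
--         alive = list(enemies)
--         killed = 0
--         for t in range(N):
--             targets = []
--             for pos in archers:
--                 cand = None
--                 for (r, c) in alive: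
--                     if r + t >= N:
--                         continue
--                     key = (N - (r + t) + abs(pos - c), c)
--                     if key[0] <= D and (cand is None or key < cand[0]):
--                         cand = (key, (r, c))
--                 if cand is not None and cand[1] not in targets:
--                     targets.append(cand[1])
--             killed += len(targets)
--             alive = [e for e in alive if e not in targets]
--         best = max(best, killed)
--     return best
-- ===== Notes on version B (the rewrite author's own statement) =====
-- stated objective: alternative
-- what changed: B replaces the grid simulation entirely by a coordinate-list simulation: enemies are extracted once as (row, col) pairs, an enemy starting at row r stands on row r+t during turn t (so the per-turn board copy, full-grid minimum scan and row-shifting pass all disappear), each archer takes the lexicographic (distance, column)-minimum over the live coordinate list, and killed enemies are filtered out of the list.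
import Mathlib
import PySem

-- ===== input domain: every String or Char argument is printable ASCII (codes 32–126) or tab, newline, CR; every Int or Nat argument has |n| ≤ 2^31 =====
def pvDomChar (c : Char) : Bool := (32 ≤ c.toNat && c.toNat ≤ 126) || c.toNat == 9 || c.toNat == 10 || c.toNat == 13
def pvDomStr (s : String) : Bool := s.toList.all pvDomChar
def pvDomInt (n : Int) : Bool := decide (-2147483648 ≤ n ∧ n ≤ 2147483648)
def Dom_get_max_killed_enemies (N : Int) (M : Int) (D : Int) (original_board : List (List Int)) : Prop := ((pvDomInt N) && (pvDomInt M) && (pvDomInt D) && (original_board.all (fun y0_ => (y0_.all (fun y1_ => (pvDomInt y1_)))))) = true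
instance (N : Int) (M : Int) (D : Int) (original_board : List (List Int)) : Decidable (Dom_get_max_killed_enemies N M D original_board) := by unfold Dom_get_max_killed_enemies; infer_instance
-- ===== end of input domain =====

-- B drops A's grid simulation: instead of copying, scanning and shifting an N×M board
-- every turn, B extracts the enemies once as a list of coordinates ((r,c) stands on row
-- r+t during turn t) and simulates on that list (objective: alternative).
-- Both Pythons are pure in their arguments (A copies rows before mutating).

-- ===== PORT A =====
-- board[r][c] (indices are always ≥ 0 at every call site; out-of-range reads are excluded by Pre_)
def pvCell (bd : List (List Int)) (r c : Int) : Int :=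
  PySem.List.pyGetD (PySem.List.pyGetD bd r []) c 0

-- board[r][c] = v (indices are always ≥ 0 and in range at every call site)
def pvSetCell (bd : List (List Int)) (r c : Int) (v : Int) : List (List Int) :=
  PySem.List.pySetD bd r (PySem.List.pySetD (PySem.List.pyGetD bd r []) c v)

-- 'new_board = zero matrix; for r,c: if board[r][c]==1 and r+1<N: new_board[r+1][c]=1',
-- written index-wise: new_board[r][c] = 1 iff r ≥ 1 and board[r-1][c] == 1
def pvShift (N M : Int) (bd : List (List Int)) : List (List Int) :=
  (PySem.List.pyRange 0 N 1).map (fun r =>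
    (PySem.List.pyRange 0 M 1).map (fun c =>
      if 1 ≤ r ∧ pvCell bd (r-1) c = 1 then (1 : Int) else 0))

-- combinations(range(M), 3), in itertools order (shared by both ports)
def pvCombos (M : Int) : List (List Int) :=
  (PySem.List.pyRange 0 M 1).flatMap (fun i =>
    (PySem.List.pyRange (i+1) M 1).flatMap (fun j =>
      (PySem.List.pyRange (j+1) M 1).map (fun k => [i, j, k])))

-- A's per-archer target search: full scan r = N-1..0, c = M-1..0 tracking (min_dist, target);
-- min_dist = none plays float('inf')
def pvScanA (N M D pos : Int) (bd : List (List Int)) : Option Int × Option (Int × Int) :=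
  (PySem.List.pyRange (N-1) (-1) (-1)).foldl (fun st r =>
    (PySem.List.pyRange (M-1) (-1) (-1)).foldl (fun st c =>
      if pvCell bd r c = 1 then
        let dist := |N - r| + |pos - c|
        if dist ≤ D then
          match st with
          | (none, _) => (some dist, some (r, c))
          | (some m, t) =>
            if dist < m then (some dist, some (r, c))
            else if dist = m then
              match t with
              | none => (some m, some (r, c))
              | some t0 => if c < t0.2 then (some m, some (r, c)) else (some m, some t0)
            else (some m, t)
        else st
      else st) st) (none, none)

def pvTurnA (N M D : Int) (archers : List Int) (st : List (List Int) × Int) :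
    List (List Int) × Int :=
  let targets : PySem.Set (Int × Int) :=
    archers.foldl (fun tg pos =>
      match (pvScanA N M D pos st.1).2 with
      | some t => PySem.Set.add tg t
      | none => tg) PySem.Set.empty
  let st2 := targets.foldl (fun (s : List (List Int) × Int) t =>
    if pvCell s.1 t.1 t.2 = 1 then (pvSetCell s.1 t.1 t.2 0, s.2 + 1) else s) st
  (pvShift N M st2.1, st2.2)

def pvSimA (N M D : Int) (bd : List (List Int)) (archers : List Int) : Int :=
  ((PySem.List.pyRange 0 N 1).foldl (fun s _ => pvTurnA N M D archers s) (bd, 0)).2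

def get_max_killed_enemies (N : Int) (M : Int) (D : Int) (original_board : List (List Int)) : Int :=
  (pvCombos M).foldl (fun mx archers => max mx (pvSimA N M D original_board archers)) 0

-- ===== PORT B =====
-- Python tuple comparison 'key < cand[0]' on (Int, Int) pairs
abbrev pvLex (p q : Int × Int) : Prop := p.1 < q.1 ∨ (p.1 = q.1 ∧ p.2 < q.2)

-- [(r, c) for r in range(N) for c in range(M) if original_board[r][c] == 1]
def pvEnemies (N M : Int) (bd : List (List Int)) : List (Int × Int) :=
  (PySem.List.pyRange 0 N 1).flatMap (fun r =>
    ((PySem.List.pyRange 0 M 1).filter (fun c =>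
      PySem.List.pyGetD (PySem.List.pyGetD bd r []) c 0 = 1)).map (fun c => (r, c)))

-- the inner 'for (r, c) in alive' loop: cand holds (key, enemy)
def pvBestTarget (N D pos t : Int) (alive : List (Int × Int)) :
    Option ((Int × Int) × (Int × Int)) :=
  alive.foldl (fun cand e =>
    if N ≤ e.1 + t then cand
    else
      let key : Int × Int := (N - (e.1 + t) + |pos - e.2|, e.2)
      match cand with
      | none => if key.1 ≤ D then some (key, e) else cand
      | some c0 => if key.1 ≤ D ∧ pvLex key c0.1 then some (key, e) else cand) none

-- one turn: collect the (deduplicated) targets, count them, filter them out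
def pvTurnC (N M D : Int) (archers : List Int) (t : Int)
    (st : List (Int × Int) × Int) : List (Int × Int) × Int :=
  let targets : List (Int × Int) := archers.foldl (fun tg pos =>
    match pvBestTarget N D pos t st.1 with
    | some c => if c.2 ∈ tg then tg else tg ++ [c.2]
    | none => tg) []
  (st.1.filter (fun e => e ∉ targets), st.2 + targets.length)

def pvSimC (N M D : Int) (enemies : List (Int × Int)) (archers : List Int) : Int :=
  ((PySem.List.pyRange 0 N 1).foldl (fun s t => pvTurnC N M D archers t s) (enemies, 0)).2

def get_max_killed_enemies_alt (N : Int) (M : Int) (D : Int) (original_board : List (List Int)) : Int :=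
  if M < 3 then 0
  else
    let enemies := pvEnemies N M original_board
    (pvCombos M).foldl (fun mx archers => max mx (pvSimC N M D enemies archers)) 0

-- ===== PRECONDITION & SPEC =====
-- Pre_ excludes exactly the inputs where Python A raises IndexError: when at least one
-- turn is simulated (M ≥ 3 and N ≥ 1) the board must have at least N rows whose first N
-- rows each have at least M columns.
def Pre_get_max_killed_enemies (N : Int) (M : Int) (D : Int) (original_board : List (List Int)) : Prop :=
  M < 3 ∨ N ≤ 0 ∨
    (N ≤ (original_board.length : Int) ∧
      ∀ row ∈ original_board.take N.toNat, M ≤ (row.length : Int))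
instance (N : Int) (M : Int) (D : Int) (original_board : List (List Int)) : Decidable (Pre_get_max_killed_enemies N M D original_board) := by unfold Pre_get_max_killed_enemies; infer_instance

def pvWitness_get_max_killed_enemies : Int × Int × Int × List (List Int) :=
  (2, 3, 3, [[1, 0, 0], [0, 1, 0]])

def Spec_get_max_killed_enemies (N : Int) (M : Int) (D : Int) (original_board : List (List Int)) (out : Int) : Prop := out = get_max_killed_enemies_alt N M D original_board
instance (N : Int) (M : Int) (D : Int) (original_board : List (List Int)) (out : Int) : Decidable (Spec_get_max_killed_enemies N M D original_board out) := by unfold Spec_get_max_killed_enemies; infer_instance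

-- ===== CLAIM (what is proved, stated in full; the proofs are below) =====
def Claim_equal_get_max_killed_enemies : Prop := ∀ (N : Int) (M : Int) (D : Int) (original_board : List (List Int)), Dom_get_max_killed_enemies N M D original_board → Pre_get_max_killed_enemies N M D original_board → Spec_get_max_killed_enemies N M D original_board (get_max_killed_enemies N M D original_board)

-- ===== LEMMAS AND PROOFS =====

-- key of a board cell for the archer at (N, pos): (distance, column); A minimises it
-- lexicographically over the whole grid, B minimises it over the live coordinate list
def pvKey (N pos : Int) (x : Int × Int) : Int × Int := (|N - x.1| + |pos - x.2|, x.2)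

-- B's key on original coordinates at turn t
def pvKeyB (N pos t : Int) (e : Int × Int) : Int × Int := (N - (e.1 + t) + |pos - e.2|, e.2)

-- original coordinates → board coordinates at turn t
def pvSh (t : Int) (e : Int × Int) : Int × Int := (e.1 + t, e.2)

abbrev pvGood (N D pos : Int) (bd : List (List Int)) (x : Int × Int) : Prop :=
  pvCell bd x.1 x.2 = 1 ∧ (pvKey N pos x).1 ≤ D

-- running minimum by key
def pvOminK {α : Type} (κ : α → Int × Int) (t : Option α) (x : α) : Option α :=
  match t with
  | none => some x
  | some t0 => if pvLex (κ x) (κ t0) then some x else some t0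

theorem pvLex_irrefl (p : Int × Int) : ¬ pvLex p p := by
  simp [pvLex]

theorem pvLex_nn_trans {p q r : Int × Int} (h1 : ¬ pvLex p q) (h2 : ¬ pvLex q r) :
    ¬ pvLex p r := by
  rcases p with ⟨a, b⟩; rcases q with ⟨c, d⟩; rcases r with ⟨e, f⟩
  simp only [pvLex] at *; omega

theorem pvLex_np_trans {p q r : Int × Int} (h1 : ¬ pvLex p q) (h2 : pvLex p r) :
    ¬ pvLex r q := by
  rcases p with ⟨a, b⟩; rcases q with ⟨c, d⟩; rcases r with ⟨e, f⟩
  simp only [pvLex] at *; omega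

theorem pvLex_total_eq {p q : Int × Int} (h1 : ¬ pvLex p q) (h2 : ¬ pvLex q p) : p = q := by
  rcases p with ⟨a, b⟩; rcases q with ⟨c, d⟩
  simp only [pvLex] at *
  have : a = c ∧ b = d := by omega
  simp [this.1, this.2]

-- specification of the running minimum
theorem pvOmin_spec {α : Type} (κ : α → Int × Int) (G : List α) :
    ∀ cur, (G.foldl (pvOminK κ) cur = none → cur = none ∧ G = []) ∧
      (∀ t, G.foldl (pvOminK κ) cur = some t →
        (t ∈ G ∨ cur = some t) ∧
        (∀ x ∈ G, ¬ pvLex (κ x) (κ t)) ∧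
        (∀ t0, cur = some t0 → ¬ pvLex (κ t0) (κ t))) := by
  induction G with
  | nil =>
    intro cur
    refine ⟨fun h => ⟨h, rfl⟩, fun t ht => ⟨Or.inr ht, by simp, ?_⟩⟩
    intro t0 h0
    rw [h0] at ht
    cases ht
    exact pvLex_irrefl _
  | cons x G ih =>
    intro cur
    have hsome : ∃ m, pvOminK κ cur x = some m := by
      cases cur with
      | none => exact ⟨x, rfl⟩
      | some t0 =>
        simp only [pvOminK]
        split
        · exact ⟨x, rfl⟩
        · exact ⟨t0, rfl⟩
    obtain ⟨m, hm⟩ := hsome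
    constructor
    · intro h
      simp only [List.foldl_cons, hm] at h
      exact absurd ((ih (some m)).1 h).1 (by simp)
    · intro t ht
      simp only [List.foldl_cons, hm] at ht
      obtain ⟨hmem, hall, hcur⟩ := (ih (some m)).2 t ht
      have hmt : ¬ pvLex (κ m) (κ t) := hcur m rfl
      have hself : ¬ pvLex (κ x) (κ m) ∧ (m = x ∨ cur = some m) := by
        cases cur with
        | none =>
          simp only [pvOminK] at hm
          cases hm
          exact ⟨pvLex_irrefl _, Or.inl rfl⟩
        | some t0 =>
          simp only [pvOminK] at hm
          split at hm
          · cases hm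
            exact ⟨pvLex_irrefl _, Or.inl rfl⟩
          · rename_i hlt
            cases hm
            exact ⟨hlt, Or.inr rfl⟩
      obtain ⟨hxm, hmo⟩ := hself
      refine ⟨?_, ?_, ?_⟩
      · rcases hmem with h | h
        · exact Or.inl (List.mem_cons_of_mem _ h)
        · injection h with h
          subst h
          rcases hmo with h | h
          · exact Or.inl (h ▸ List.mem_cons_self)
          · exact Or.inr h
      · intro y hy
        rcases List.mem_cons.1 hy with rfl | h
        · exact pvLex_nn_trans hxm hmt
        · exact hall y h
      · intro t0 h0
        subst h0
        simp only [pvOminK] at hm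
        split at hm
        · rename_i hlt
          cases hm
          exact pvLex_np_trans hmt hlt
        · cases hm
          exact hmt

-- generic: a fold on a paired state whose first component is determined by the second
theorem pvFoldPair {α β γ : Type} (inv : γ → β) (f : β × γ → α → β × γ) (h : γ → α → γ)
    (hc : ∀ t a, f (inv t, t) a = (inv (h t a), h t a)) (L : List α) (t : γ) :
    L.foldl f (inv t, t) = (inv (L.foldl h t), L.foldl h t) := by
  induction L generalizing t with
  | nil => rfl
  | cons a L ih => simp only [List.foldl_cons, hc]; exact ih _

-- A's inner cell update is the guarded running minimum
theorem pvCellStep (N M D pos : Int) (bd : List (List Int)) (t : Option (Int × Int))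
    (r c : Int) :
    (if pvCell bd r c = 1 then
        let dist := |N - r| + |pos - c|
        if dist ≤ D then
          match (Option.map (fun x => (pvKey N pos x).1) t, t) with
          | (none, _) => (some dist, some (r, c))
          | (some m, t) =>
            if dist < m then (some dist, some (r, c))
            else if dist = m then
              match t with
              | none => (some m, some (r, c))
              | some t0 => if c < t0.2 then (some m, some (r, c)) else (some m, some t0)
            else (some m, t)
        else (Option.map (fun x => (pvKey N pos x).1) t, t)
      else (Option.map (fun x => (pvKey N pos x).1) t, t)) =
      (Option.map (fun x => (pvKey N pos x).1)
          (if pvGood N D pos bd (r, c) then pvOminK (pvKey N pos) t (r, c) else t),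
        if pvGood N D pos bd (r, c) then pvOminK (pvKey N pos) t (r, c) else t) := by
  by_cases h1 : pvCell bd r c = 1
  · by_cases h2 : |N - r| + |pos - c| ≤ D
    · have hg : pvGood N D pos bd (r, c) := ⟨h1, h2⟩
      cases t with
      | none => simp [h1, h2, hg, pvOminK, pvKey]
      | some t0 =>
        simp only [h1, if_true, h2, pvOminK, pvKey, pvLex]
        rw [if_pos hg]
        by_cases hlex : |N - r| + |pos - c| < |N - t0.1| + |pos - t0.2| ∨
            (|N - r| + |pos - c| = |N - t0.1| + |pos - t0.2| ∧ c < t0.2)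
        · rw [if_pos hlex]
          simp only [Option.map_some]
          rcases hlex with h | ⟨h, h'⟩
          · rw [if_pos h]
          · rw [if_neg (by rw [h]; exact lt_irrefl _), if_pos h, if_pos h', h]
        · rw [if_neg hlex]
          simp only [Option.map_some]
          push Not at hlex
          rw [if_neg (not_lt.2 hlex.1)]
          by_cases h : |N - r| + |pos - c| = |N - t0.1| + |pos - t0.2|
          · rw [if_pos h, if_neg (not_lt.2 (hlex.2 h))]
          · rw [if_neg h]
    · have hg : ¬ pvGood N D pos bd (r, c) := fun hc => h2 hc.2
      cases t <;> simp [h1, h2, hg]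
  · have hg : ¬ pvGood N D pos bd (r, c) := fun hc => h1 hc.1
    cases t <;> simp [h1, hg]

-- A's scan is the running minimum over the filtered cell list
theorem pvScanA_eq_min (N M D pos : Int) (bd : List (List Int)) :
    (pvScanA N M D pos bd).2 =
      (((PySem.List.pyRange (N-1) (-1) (-1)).flatMap (fun r =>
          (PySem.List.pyRange (M-1) (-1) (-1)).map (fun c => (r, c)))).filter
            (fun x => decide (pvGood N D pos bd x))).foldl (pvOminK (pvKey N pos)) none := by
  have hpair :
      pvScanA N M D pos bd =
        (Option.map (fun x => (pvKey N pos x).1)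
            ((PySem.List.pyRange (N-1) (-1) (-1)).foldl (fun t r =>
              (PySem.List.pyRange (M-1) (-1) (-1)).foldl (fun t c =>
                if pvGood N D pos bd (r, c) then pvOminK (pvKey N pos) t (r, c) else t) t) none),
          (PySem.List.pyRange (N-1) (-1) (-1)).foldl (fun t r =>
            (PySem.List.pyRange (M-1) (-1) (-1)).foldl (fun t c =>
              if pvGood N D pos bd (r, c) then pvOminK (pvKey N pos) t (r, c) else t) t) none) := by
    unfold pvScanA
    exact pvFoldPair (Option.map (fun x => (pvKey N pos x).1)) _ _
      (fun t r => pvFoldPair (Option.map (fun x => (pvKey N pos x).1)) _ _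
        (fun t c => pvCellStep N M D pos bd t r c) _ t) _ none
  rw [hpair,
    ← PySem.List.foldl_ite_eq_foldl_filter (pvGood N D pos bd) (pvOminK (pvKey N pos))]
  simp only [List.foldl_flatMap, List.foldl_map]

-- membership in A's candidate list
theorem pvMemLA (N M D pos : Int) (bd : List (List Int)) (x : Int × Int) :
    x ∈ (((PySem.List.pyRange (N-1) (-1) (-1)).flatMap (fun r =>
        (PySem.List.pyRange (M-1) (-1) (-1)).map (fun c => (r, c)))).filter
          (fun x => decide (pvGood N D pos bd x))) ↔
      (0 ≤ x.1 ∧ x.1 ≤ N - 1) ∧ (0 ≤ x.2 ∧ x.2 ≤ M - 1) ∧ pvGood N D pos bd x := by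
  cases x with
  | mk a b =>
    simp only [List.mem_filter, List.mem_flatMap, List.mem_map,
      PySem.List.mem_pyRange_neg_one, Prod.mk.injEq, decide_eq_true_eq]
    constructor
    · rintro ⟨⟨r, hr, c', hc', rfl, rfl⟩, hg⟩
      exact ⟨⟨by omega, by omega⟩, ⟨by omega, by omega⟩, hg⟩
    · rintro ⟨⟨h1, h2⟩, ⟨h3, h4⟩, hg⟩
      exact ⟨⟨a, by omega, b, by omega, rfl, rfl⟩, hg⟩

-- B's inner loop is the guarded running minimum (paired with its key)
theorem pvBest_fold (N D pos t : Int) (alive : List (Int × Int)) :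
    ∀ (c : Option (Int × Int)),
      alive.foldl (fun cand e =>
        if N ≤ e.1 + t then cand
        else
          let key : Int × Int := (N - (e.1 + t) + |pos - e.2|, e.2)
          match cand with
          | none => if key.1 ≤ D then some (key, e) else cand
          | some c0 => if key.1 ≤ D ∧ pvLex key c0.1 then some (key, e) else cand)
        (Option.map (fun e => (pvKeyB N pos t e, e)) c) =
      Option.map (fun e => (pvKeyB N pos t e, e))
        (alive.foldl (fun cand e =>
          if e.1 + t < N ∧ (pvKeyB N pos t e).1 ≤ D then pvOminK (pvKeyB N pos t) cand e
          else cand) c) := by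
  induction alive with
  | nil => intro c; rfl
  | cons e alive ih =>
    intro c
    simp only [List.foldl_cons]
    rw [← ih]
    congr 1
    by_cases hskip : N ≤ e.1 + t
    · have hP : ¬ (e.1 + t < N ∧ (pvKeyB N pos t e).1 ≤ D) := fun hc => absurd hc.1 (by omega)
      cases c <;> simp [hskip, hP]
    · have hlt : e.1 + t < N := by omega
      by_cases hD : N - (e.1 + t) + |pos - e.2| ≤ D
      · have hP : e.1 + t < N ∧ (pvKeyB N pos t e).1 ≤ D := ⟨hlt, hD⟩
        cases c with
        | none => simp [hskip, hP, pvOminK, pvKeyB, hD]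
        | some c0 =>
          by_cases hlex : pvLex (pvKeyB N pos t e) (pvKeyB N pos t c0)
          · simp only [Option.map_some, if_neg hskip, if_pos hP, pvOminK, if_pos hlex]
            rw [if_pos (And.intro hD (by simpa [pvKeyB] using hlex))]
            simp [pvKeyB]
          · simp only [Option.map_some, if_neg hskip, if_pos hP, pvOminK, if_neg hlex]
            rw [if_neg (fun hc => hlex (by simpa [pvKeyB] using hc.2))]
      · have hP : ¬ (e.1 + t < N ∧ (pvKeyB N pos t e).1 ≤ D) := fun hc => hD hc.2
        cases c with
        | none => simp [hskip, hP, hD]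
        | some c0 => simp [hskip, hP, hD]

theorem pvBest_eq (N D pos t : Int) (alive : List (Int × Int)) :
    pvBestTarget N D pos t alive =
      Option.map (fun e => (pvKeyB N pos t e, e))
        ((alive.filter (fun e =>
            decide (e.1 + t < N ∧ (pvKeyB N pos t e).1 ≤ D))).foldl
          (pvOminK (pvKeyB N pos t)) none) := by
  have h := pvBest_fold N D pos t alive none
  simp only [Option.map_none] at h
  unfold pvBestTarget
  rw [h, PySem.List.foldl_ite_eq_foldl_filter
    (fun e => e.1 + t < N ∧ (pvKeyB N pos t e).1 ≤ D) (pvOminK (pvKeyB N pos t))]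

-- the two minimisations agree when the candidate sets correspond
theorem pvMinBridge (κA κB : (Int × Int) → Int × Int) (sh : (Int × Int) → (Int × Int))
    (LA LB : List (Int × Int))
    (hmem : ∀ x, x ∈ LA ↔ ∃ e ∈ LB, sh e = x)
    (hkey : ∀ e ∈ LB, κA (sh e) = κB e)
    (hinj : ∀ x ∈ LA, ∀ y ∈ LA, κA x = κA y → x = y) :
    LA.foldl (pvOminK κA) none = Option.map sh (LB.foldl (pvOminK κB) none) := by
  cases hB : LB.foldl (pvOminK κB) none with
  | none =>
    have hLB := ((pvOmin_spec κB LB) none).1 hB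
    have hLA : LA = [] := by
      rw [List.eq_nil_iff_forall_not_mem]
      intro x hx
      obtain ⟨e, he, -⟩ := (hmem x).1 hx
      rw [hLB.2] at he
      exact absurd he List.not_mem_nil
    rw [hLA]
    rfl
  | some mB =>
    obtain ⟨hmemB, hallB, -⟩ := ((pvOmin_spec κB LB) none).2 mB hB
    have hmB : mB ∈ LB := by
      rcases hmemB with h | h
      · exact h
      · cases h
    have hshA : sh mB ∈ LA := (hmem (sh mB)).2 ⟨mB, hmB, rfl⟩
    cases hA : LA.foldl (pvOminK κA) none with
    | none =>
      have := ((pvOmin_spec κA LA) none).1 hA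
      rw [this.2] at hshA
      exact absurd hshA List.not_mem_nil
    | some mA =>
      obtain ⟨hmemA, hallA, -⟩ := ((pvOmin_spec κA LA) none).2 mA hA
      have hmA : mA ∈ LA := by
        rcases hmemA with h | h
        · exact h
        · cases h
      obtain ⟨eA, heA, heAsh⟩ := (hmem mA).1 hmA
      have h1 : ¬ pvLex (κA (sh mB)) (κA mA) := hallA (sh mB) hshA
      have h2 : ¬ pvLex (κA mA) (κA (sh mB)) := by
        rw [← heAsh, hkey eA heA, hkey mB hmB]
        exact hallB eA heA
      have := hinj mA hmA (sh mB) hshA (pvLex_total_eq h2 h1)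
      rw [this]
      rfl

-- board shape: at least N rows, the first N of which have at least M columns
def pvShape (N M : Int) (bd : List (List Int)) : Prop :=
  N ≤ (bd.length : Int) ∧
    ∀ row : Int, 0 ≤ row → row < N → M ≤ ((PySem.List.pyGetD bd row []).length : Int)

-- the simulation invariant relating A's board at turn t to B's live coordinate list
def pvInv (N M t : Int) (bd : List (List Int)) (alive : List (Int × Int)) : Prop :=
  pvShape N M bd ∧ alive.Nodup ∧
    (∀ e ∈ alive, 0 ≤ e.1 ∧ e.1 < N ∧ 0 ≤ e.2 ∧ e.2 < M) ∧
    (∀ row c : Int, 0 ≤ row → row < N → 0 ≤ c → c < M →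
      (pvCell bd row c = 1 ↔ (row - t, c) ∈ alive))

-- pyGetD after pySetD, with Int indices known to be in range
theorem pvGetSet {α : Type} (xs : List α) (i j : Int) (v d : α)
    (hi : 0 ≤ i) (hj : 0 ≤ j) (hlt : i.toNat < xs.length) :
    PySem.List.pyGetD (PySem.List.pySetD xs i v) j d =
      if j = i then v else PySem.List.pyGetD xs j d := by
  have h := PySem.List.pyGetD_pySetD_natCast xs i.toNat j.toNat v d hlt
  rw [Int.toNat_of_nonneg hi, Int.toNat_of_nonneg hj] at h
  rw [h]
  by_cases hji : j = i
  · rw [if_pos (by omega : j.toNat = i.toNat), if_pos hji]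
  · rw [if_neg (by omega : ¬ j.toNat = i.toNat), if_neg hji]

theorem pvCell_set (N M : Int) (bd : List (List Int)) (hs : pvShape N M bd)
    (r c r' c' v : Int) (hr : 0 ≤ r) (hrN : r < N) (hc : 0 ≤ c) (hcM : c < M)
    (hr' : 0 ≤ r') (hrN' : r' < N) (hc' : 0 ≤ c') (hcM' : c' < M) :
    pvCell (pvSetCell bd r c v) r' c' =
      if r' = r ∧ c' = c then v else pvCell bd r' c' := by
  obtain ⟨hlen, hrow⟩ := hs
  have hrlt : r.toNat < bd.length := by omega
  have hclt : c.toNat < (PySem.List.pyGetD bd r []).length := by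
    have := hrow r hr hrN; omega
  unfold pvCell pvSetCell
  rw [pvGetSet bd r r' _ [] hr hr' hrlt]
  by_cases h : r' = r
  · rw [if_pos h, h, pvGetSet _ c c' v 0 hc hc' hclt]
    by_cases h2 : c' = c
    · rw [if_pos h2, if_pos ⟨rfl, h2⟩]
    · rw [if_neg h2, if_neg (fun hc => h2 hc.2)]
  · rw [if_neg h, if_neg (fun hc => h hc.1)]

theorem pvSet_shape (N M : Int) (bd : List (List Int)) (hs : pvShape N M bd)
    (r c v : Int) (hr : 0 ≤ r) (hrN : r < N) :
    pvShape N M (pvSetCell bd r c v) := by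
  obtain ⟨hlen, hrow⟩ := hs
  have hrlt : r.toNat < bd.length := by omega
  constructor
  · unfold pvSetCell
    rw [PySem.List.length_pySetD]
    exact hlen
  · intro row h0 hN
    unfold pvSetCell
    rw [pvGetSet bd r row _ [] hr h0 hrlt]
    by_cases h : row = r
    · rw [if_pos h, PySem.List.length_pySetD]
      exact h ▸ hrow r hr hrN
    · rw [if_neg h]
      exact hrow row h0 hN

theorem pvShift_cell (N M : Int) (bd : List (List Int)) (row c : Int)
    (h0 : 0 ≤ row) (hN : row < N) (hc : 0 ≤ c) (hcM : c < M) :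
    pvCell (pvShift N M bd) row c =
      if 1 ≤ row ∧ pvCell bd (row - 1) c = 1 then 1 else 0 := by
  unfold pvShift pvCell
  rw [PySem.List.pyGetD_map_pyRange_of_nonneg _ N row [] h0 hN,
    PySem.List.pyGetD_map_pyRange_of_nonneg _ M c 0 hc hcM]

theorem pvShift_shape (N M : Int) (bd : List (List Int)) :
    pvShape N M (pvShift N M bd) := by
  constructor
  · unfold pvShift
    rw [List.length_map, PySem.List.length_pyRange_one]
    omega
  · intro row h0 hN
    unfold pvShift
    rw [PySem.List.pyGetD_map_pyRange_of_nonneg _ N row [] h0 hN,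
      List.length_map, PySem.List.length_pyRange_one]
    omega

-- the shooting loop of A
def pvShootF (s : List (List Int) × Int) (x : Int × Int) : List (List Int) × Int :=
  if pvCell s.1 x.1 x.2 = 1 then (pvSetCell s.1 x.1 x.2 0, s.2 + 1) else s

theorem pvShoot (N M : Int) : ∀ (ts : List (Int × Int)) (bd : List (List Int)) (k : Int),
    pvShape N M bd → ts.Nodup →
    (∀ x ∈ ts, 0 ≤ x.1 ∧ x.1 < N ∧ 0 ≤ x.2 ∧ x.2 < M ∧ pvCell bd x.1 x.2 = 1) →
    (ts.foldl pvShootF (bd, k)).2 = k + ts.length ∧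
      pvShape N M (ts.foldl pvShootF (bd, k)).1 ∧
      (∀ row c : Int, 0 ≤ row → row < N → 0 ≤ c → c < M →
        (pvCell (ts.foldl pvShootF (bd, k)).1 row c = 1 ↔
          (pvCell bd row c = 1 ∧ (row, c) ∉ ts))) := by
  intro ts
  induction ts with
  | nil =>
    intro bd k hs _ _
    exact ⟨by simp, hs, fun row c _ _ _ _ => by simp⟩
  | cons x ts ih =>
    intro bd k hs hnd hall
    obtain ⟨hx1, hx2, hx3, hx4, hxcell⟩ := hall x List.mem_cons_self
    rw [List.nodup_cons] at hnd
    simp only [List.foldl_cons, pvShootF, if_pos hxcell]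
    have hs1 : pvShape N M (pvSetCell bd x.1 x.2 0) :=
      pvSet_shape N M bd hs x.1 x.2 0 hx1 hx2
    have hcell1 : ∀ row c : Int, 0 ≤ row → row < N → 0 ≤ c → c < M →
        pvCell (pvSetCell bd x.1 x.2 0) row c =
          if row = x.1 ∧ c = x.2 then 0 else pvCell bd row c := by
      intro row c a b d e
      exact pvCell_set N M bd hs x.1 x.2 row c 0 hx1 hx2 hx3 hx4 a b d e
    have hts1 : ∀ y ∈ ts, 0 ≤ y.1 ∧ y.1 < N ∧ 0 ≤ y.2 ∧ y.2 < M ∧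
        pvCell (pvSetCell bd x.1 x.2 0) y.1 y.2 = 1 := by
      intro y hy
      obtain ⟨hy1, hy2, hy3, hy4, hycell⟩ := hall y (List.mem_cons_of_mem _ hy)
      refine ⟨hy1, hy2, hy3, hy4, ?_⟩
      rw [hcell1 y.1 y.2 hy1 hy2 hy3 hy4, if_neg ?_]
      · exact hycell
      · rintro ⟨ha, hb⟩
        exact hnd.1 (by cases x; cases y; simp_all)
    obtain ⟨ihk, ihs, ihc⟩ := ih (pvSetCell bd x.1 x.2 0) (k + 1) hs1 hnd.2 hts1
    refine ⟨by rw [ihk]; simp; ring, ihs, ?_⟩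
    intro row c a b d e
    rw [ihc row c a b d e, hcell1 row c a b d e]
    by_cases hx : row = x.1 ∧ c = x.2
    · rw [if_pos hx]
      have hxeq : (row, c) = x := by cases x; simp_all
      simp [hxeq]
    · rw [if_neg hx]
      have hne : (row, c) ≠ x := by
        intro hcon
        exact hx (by cases x; simp_all)
      simp [List.mem_cons, hne]

theorem pvTurn_corr (N M D t : Int) (archers : List Int) (bd : List (List Int))
    (alive : List (Int × Int)) (k : Int) (ht : 0 ≤ t) (htN : t < N) (hinv : pvInv N M t bd alive) :
    (pvTurnA N M D archers (bd, k)).2 = (pvTurnC N M D archers t (alive, k)).2 ∧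
      pvInv N M (t + 1) (pvTurnA N M D archers (bd, k)).1
        (pvTurnC N M D archers t (alive, k)).1 := by
  obtain ⟨hshape, hnd, hrange, hcw⟩ := hinv
  -- the two per-archer searches agree, up to the coordinate shift
  have hscan : ∀ pos, (pvScanA N M D pos bd).2 =
      Option.map (pvSh t) (Option.map (fun c => c.2) (pvBestTarget N D pos t alive)) := by
    intro pos
    rw [pvScanA_eq_min, pvBest_eq, Option.map_map, Option.map_map]
    rw [show ((pvSh t ∘ fun (c : (Int × Int) × (Int × Int)) => c.2) ∘
        fun e => (pvKeyB N pos t e, e)) = pvSh t from rfl]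
    apply pvMinBridge (pvKey N pos) (pvKeyB N pos t) (pvSh t)
    · intro x
      rw [pvMemLA]
      constructor
      · rintro ⟨⟨hx1, hx2⟩, ⟨hx3, hx4⟩, hcell, hdist⟩
        refine ⟨(x.1 - t, x.2), ?_, ?_⟩
        · rw [List.mem_filter]
          refine ⟨(hcw x.1 x.2 hx1 (by omega) hx3 (by omega)).1 hcell, ?_⟩
          simp only [decide_eq_true_eq]
          refine ⟨by simp; omega, ?_⟩
          simp only [pvKeyB]
          have habs : |N - x.1| = N - x.1 := abs_of_nonneg (by omega)
          simp only [pvKey, habs] at hdist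
          have harith : N - (x.1 - t + t) = N - x.1 := by ring
          simpa [harith] using hdist
        · obtain ⟨a, b⟩ := x
          simp [pvSh]
      · rintro ⟨e, heLB, rfl⟩
        rw [List.mem_filter] at heLB
        obtain ⟨heA, hP⟩ := heLB
        simp only [decide_eq_true_eq] at hP
        obtain ⟨he1, he2, he3, he4⟩ := hrange e heA
        obtain ⟨r0, c0⟩ := e
        simp only [pvSh] at *
        refine ⟨⟨by omega, by omega⟩, ⟨by omega, by omega⟩, ?_, ?_⟩
        · have := (hcw (r0 + t) c0 (by omega) (by omega) (by omega) (by omega)).2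
          have heq : (r0 + t - t, c0) = (r0, c0) := by simp
          rw [heq] at this
          exact this heA
        · simp only [pvKey]
          have habs : |N - (r0 + t)| = N - (r0 + t) := abs_of_nonneg (by omega)
          rw [habs]
          simpa [pvKeyB] using hP.2
    · intro e heLB
      rw [List.mem_filter] at heLB
      simp only [decide_eq_true_eq] at heLB
      obtain ⟨r0, c0⟩ := e
      simp only [pvKey, pvKeyB, pvSh]
      have habs : |N - (r0 + t)| = N - (r0 + t) := abs_of_nonneg (by omega)
      rw [habs]
    · intro x hx y hy hxy
      rw [pvMemLA] at hx hy
      obtain ⟨a, b⟩ := x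
      obtain ⟨a', b'⟩ := y
      have h1 : |N - a| = N - a := abs_of_nonneg (by omega)
      have h2 : |N - a'| = N - a' := abs_of_nonneg (by omega)
      simp only [pvKey, h1, h2, Prod.mk.injEq] at hxy
      obtain ⟨hfst, hsnd⟩ := hxy
      subst hsnd
      simp only [Prod.mk.injEq, and_true]
      omega
  -- a found target is a live enemy still on the board
  have hbest_mem : ∀ pos c, pvBestTarget N D pos t alive = some c →
      c.2 ∈ alive ∧ c.2.1 + t < N := by
    intro pos c hc
    rw [pvBest_eq] at hc
    cases hfold : (alive.filter (fun e =>
        decide (e.1 + t < N ∧ (pvKeyB N pos t e).1 ≤ D))).foldl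
        (pvOminK (pvKeyB N pos t)) none with
    | none => rw [hfold] at hc; cases hc
    | some m =>
      rw [hfold] at hc
      obtain ⟨hmm, -, -⟩ := ((pvOmin_spec (pvKeyB N pos t) _) none).2 m hfold
      have hmemf : m ∈ alive.filter (fun e =>
          decide (e.1 + t < N ∧ (pvKeyB N pos t e).1 ≤ D)) := by
        rcases hmm with h | h
        · exact h
        · cases h
      rw [List.mem_filter] at hmemf
      simp only [decide_eq_true_eq] at hmemf
      simp only [Option.map_some, Option.some.injEq] at hc
      rw [← hc]
      exact ⟨hmemf.1, hmemf.2.1⟩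
  have hshinj : Function.Injective (pvSh t) := by
    intro a b h
    obtain ⟨a1, a2⟩ := a
    obtain ⟨b1, b2⟩ := b
    simp only [pvSh, Prod.mk.injEq] at h ⊢
    omega
  have haddeq : ∀ (s : List (Int × Int)) (x : Int × Int),
      PySem.Set.add s x = if x ∈ s then s else s ++ [x] := by
    intro s x
    simp [PySem.Set.add, PySem.Set.contains]
  -- the collected target lists correspond
  have htg : ∀ (ars : List Int) (tgB : List (Int × Int)), tgB.Nodup →
      (∀ e ∈ tgB, e ∈ alive ∧ e.1 + t < N) →
      (ars.foldl (fun tg pos =>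
          match (pvScanA N M D pos bd).2 with
          | some x => PySem.Set.add tg x
          | none => tg) (tgB.map (pvSh t))
        = (ars.foldl (fun tg pos =>
            match pvBestTarget N D pos t alive with
            | some c => if c.2 ∈ tg then tg else tg ++ [c.2]
            | none => tg) tgB).map (pvSh t))
      ∧ (ars.foldl (fun tg pos =>
            match pvBestTarget N D pos t alive with
            | some c => if c.2 ∈ tg then tg else tg ++ [c.2]
            | none => tg) tgB).Nodup
      ∧ (∀ e ∈ (ars.foldl (fun tg pos =>
            match pvBestTarget N D pos t alive with
            | some c => if c.2 ∈ tg then tg else tg ++ [c.2]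
            | none => tg) tgB), e ∈ alive ∧ e.1 + t < N) := by
    intro ars
    induction ars with
    | nil => intro tgB h1 h2; exact ⟨rfl, h1, h2⟩
    | cons pos ars ih =>
      intro tgB hnd' hprop
      simp only [List.foldl_cons, hscan pos]
      cases hbv : pvBestTarget N D pos t alive with
      | none =>
        simp only [Option.map_none]
        exact ih tgB hnd' hprop
      | some c =>
        obtain ⟨hcal, hcN⟩ := hbest_mem pos c hbv
        simp only [Option.map_some]
        rw [haddeq (tgB.map (pvSh t)) (pvSh t c.2)]
        have hmemiff : (pvSh t c.2 ∈ tgB.map (pvSh t)) ↔ c.2 ∈ tgB := by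
          constructor
          · intro h
            obtain ⟨e, he, heq⟩ := List.mem_map.1 h
            rwa [← hshinj heq]
          · intro h
            exact List.mem_map_of_mem h
        by_cases hm : c.2 ∈ tgB
        · rw [if_pos (hmemiff.2 hm), if_pos hm]
          exact ih tgB hnd' hprop
        · rw [if_neg (fun h => hm (hmemiff.1 h)), if_neg hm]
          have hmap : tgB.map (pvSh t) ++ [pvSh t c.2] = (tgB ++ [c.2]).map (pvSh t) := by
            simp
          rw [hmap]
          refine ih (tgB ++ [c.2]) ?_ ?_
          · simp [List.nodup_append, hnd']
            intro a b hmem heq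
            exact hm (heq ▸ hmem)
          · intro e he
            rcases List.mem_append.1 he with h | h
            · exact hprop e h
            · rw [List.mem_singleton.1 h]
              exact ⟨hcal, hcN⟩
  obtain ⟨htgeq, htgnd, htgprop⟩ := htg archers [] List.nodup_nil (by simp)
  simp only [pvTurnA, pvTurnC]
  rw [show (PySem.Set.empty : PySem.Set (Int × Int)) =
      ([] : List (Int × Int)).map (pvSh t) from rfl, htgeq]
  -- abbreviate B's target list
  set tgB := archers.foldl (fun tg pos =>
      match pvBestTarget N D pos t alive with
      | some c => if c.2 ∈ tg then tg else tg ++ [c.2]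
      | none => tg) ([] : List (Int × Int)) with htgB
  have hsprop : ∀ x ∈ tgB.map (pvSh t),
      0 ≤ x.1 ∧ x.1 < N ∧ 0 ≤ x.2 ∧ x.2 < M ∧ pvCell bd x.1 x.2 = 1 := by
    intro x hx
    obtain ⟨e, he, rfl⟩ := List.mem_map.1 hx
    obtain ⟨heal, heN⟩ := htgprop e he
    obtain ⟨he1, he2, he3, he4⟩ := hrange e heal
    obtain ⟨r0, c0⟩ := e
    simp only [pvSh] at *
    refine ⟨by omega, by omega, by omega, by omega, ?_⟩
    have := (hcw (r0 + t) c0 (by omega) (by omega) (by omega) (by omega)).2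
    have heq : (r0 + t - t, c0) = (r0, c0) := by simp
    rw [heq] at this
    exact this heal
  have hndmap : (tgB.map (pvSh t)).Nodup := htgnd.map hshinj
  have hFeq : (fun (s : List (List Int) × Int) (x : Int × Int) =>
      if pvCell s.1 x.1 x.2 = 1 then (pvSetCell s.1 x.1 x.2 0, s.2 + 1) else s) = pvShootF :=
    rfl
  rw [hFeq]
  obtain ⟨hk2, hs2, hc2⟩ := pvShoot N M (tgB.map (pvSh t)) bd k hshape hndmap hsprop
  refine ⟨by rw [hk2]; simp, ?_⟩
  refine ⟨pvShift_shape N M _, hnd.filter _, ?_, ?_⟩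
  · intro e he
    exact hrange e (List.mem_filter.1 he).1
  · intro row c h0 hN hc0 hcM
    rw [pvShift_cell N M _ row c h0 hN hc0 hcM]
    have hsplit : ((if 1 ≤ row ∧
        pvCell ((tgB.map (pvSh t)).foldl pvShootF (bd, k)).1 (row - 1) c = 1
        then (1 : Int) else 0) = 1) ↔
        (1 ≤ row ∧ pvCell ((tgB.map (pvSh t)).foldl pvShootF (bd, k)).1 (row - 1) c = 1) := by
      split_ifs with h <;> simp [h]
    rw [hsplit]
    have hmemtgiff : ((row - 1, c) ∈ tgB.map (pvSh t)) ↔ (row - (t + 1), c) ∈ tgB := by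
      constructor
      · intro h
        obtain ⟨e, he, heq⟩ := List.mem_map.1 h
        obtain ⟨r0, c0⟩ := e
        simp only [pvSh, Prod.mk.injEq] at heq
        have : (r0, c0) = (row - (t + 1), c) := by
          simp only [Prod.mk.injEq]; omega
        rwa [← this]
      · intro h
        have := List.mem_map_of_mem (f := pvSh t) h
        simpa [pvSh, show row - (t + 1) + t = row - 1 by ring] using this
    by_cases hrow : 1 ≤ row
    · rw [hc2 (row - 1) c (by omega) (by omega) hc0 hcM,
        hcw (row - 1) c (by omega) (by omega) hc0 hcM]
      have harith : row - 1 - t = row - (t + 1) := by ring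
      rw [harith]
      simp only [List.mem_filter, decide_eq_true_eq]
      constructor
      · rintro ⟨-, hin, hnot⟩
        exact ⟨hin, by simpa using fun hmem => hnot (hmemtgiff.2 hmem)⟩
      · rintro ⟨hin, hnot⟩
        exact ⟨hrow, hin, fun hmem => hnot (hmemtgiff.1 hmem)⟩
    · constructor
      · rintro ⟨h1, -⟩
        exact absurd h1 hrow
      · intro hmem
        have := hrange _ (List.mem_filter.1 hmem).1
        omega

theorem pvLoop_corr (N M D : Int) (archers : List Int) :
    ∀ (n : Nat) (a : Int) (bd : List (List Int)) (alive : List (Int × Int)) (k : Int),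
      0 ≤ a → (N - a).toNat = n → pvInv N M a bd alive →
      ((PySem.List.pyRange a N 1).foldl (fun s _ => pvTurnA N M D archers s) (bd, k)).2 =
        ((PySem.List.pyRange a N 1).foldl (fun s t => pvTurnC N M D archers t s) (alive, k)).2 := by
  intro n
  induction n with
  | zero =>
    intro a bd alive k ha hn _
    rw [PySem.List.pyRange_one_eq_nil (by omega)]
    rfl
  | succ n ih =>
    intro a bd alive k ha hn hinv
    rw [PySem.List.pyRange_one_cons (by omega)]
    simp only [List.foldl_cons]
    obtain ⟨hk, hinv'⟩ := pvTurn_corr N M D a archers bd alive k ha (by omega) hinv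
    have h1 : pvTurnA N M D archers (bd, k) =
        ((pvTurnA N M D archers (bd, k)).1, (pvTurnC N M D archers a (alive, k)).2) := by
      rw [← hk]
    have h2 : pvTurnC N M D archers a (alive, k) =
        ((pvTurnC N M D archers a (alive, k)).1, (pvTurnC N M D archers a (alive, k)).2) := by
      rfl
    rw [h1, h2]
    exact ih (a + 1) _ _ _ (by omega) (by omega) hinv'

theorem pvEnemies_mem (N M : Int) (bd : List (List Int)) (e : Int × Int) :
    e ∈ pvEnemies N M bd ↔
      0 ≤ e.1 ∧ e.1 < N ∧ 0 ≤ e.2 ∧ e.2 < M ∧ pvCell bd e.1 e.2 = 1 := by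
  cases e with
  | mk r c =>
    simp only [pvEnemies, pvCell, List.mem_flatMap, List.mem_map, List.mem_filter,
      PySem.List.mem_pyRange_one, Prod.mk.injEq, decide_eq_true_eq]
    constructor
    · rintro ⟨r', hr', c', ⟨hc', hcell⟩, rfl, rfl⟩
      exact ⟨hr'.1, hr'.2, hc'.1, hc'.2, hcell⟩
    · rintro ⟨h1, h2, h3, h4, h5⟩
      exact ⟨r, ⟨h1, h2⟩, c, ⟨⟨h3, h4⟩, h5⟩, rfl, rfl⟩

theorem pvEnemies_nodup (N M : Int) (bd : List (List Int)) :
    (pvEnemies N M bd).Nodup := by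
  unfold pvEnemies
  rw [List.Nodup, List.pairwise_flatMap]
  constructor
  · intro r hr
    rw [List.pairwise_map]
    refine List.Pairwise.imp ?_
      (List.Pairwise.filter _ (PySem.List.pairwise_lt_pyRange_one 0 M))
    intro a b hab
    simp only [ne_eq, Prod.mk.injEq, not_and]
    omega
  · refine List.Pairwise.imp ?_ (PySem.List.pairwise_lt_pyRange_one 0 N)
    intro a b hab x hx y hy
    simp only [List.mem_map, List.mem_filter] at hx hy
    obtain ⟨c1, -, rfl⟩ := hx
    obtain ⟨c2, -, rfl⟩ := hy
    simp only [ne_eq, Prod.mk.injEq, not_and]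
    omega

theorem pvInv_init (N M : Int) (bd : List (List Int)) (hs : pvShape N M bd) :
    pvInv N M 0 bd (pvEnemies N M bd) := by
  refine ⟨hs, pvEnemies_nodup N M bd, ?_, ?_⟩
  · intro e he
    have := (pvEnemies_mem N M bd e).1 he
    exact ⟨this.1, this.2.1, this.2.2.1, this.2.2.2.1⟩
  · intro row c h1 h2 h3 h4
    rw [pvEnemies_mem]
    constructor
    · intro hc
      exact ⟨by omega, by omega, by omega, by omega, by simpa using hc⟩
    · intro hc
      simpa using hc.2.2.2.2

theorem pvSim_corr (N M D : Int) (bd : List (List Int)) (archers : List Int)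
    (h : pvShape N M bd ∨ N ≤ 0) :
    pvSimA N M D bd archers = pvSimC N M D (pvEnemies N M bd) archers := by
  rcases h with hs | hN
  · exact pvLoop_corr N M D archers (N - 0).toNat 0 bd (pvEnemies N M bd) 0 le_rfl rfl
      (pvInv_init N M bd hs)
  · unfold pvSimA pvSimC
    rw [PySem.List.pyRange_one_eq_nil (by omega)]
    rfl

theorem pvCombos_nil (M : Int) (h : M < 3) : pvCombos M = [] := by
  rw [List.eq_nil_iff_forall_not_mem]
  intro x hx
  simp only [pvCombos, List.mem_flatMap, List.mem_map, PySem.List.mem_pyRange_one] at hx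
  obtain ⟨i, hi, j, hj, k, hk, -⟩ := hx
  omega

theorem pvPre_shape (N M : Int) (bd : List (List Int))
    (h1 : N ≤ (bd.length : Int)) (h2 : ∀ row ∈ bd.take N.toNat, M ≤ (row.length : Int)) :
    pvShape N M bd := by
  refine ⟨h1, ?_⟩
  intro row hr0 hrN
  have hlt : row.toNat < bd.length := by omega
  rw [PySem.List.pyGetD_of_nonneg _ _ hr0]
  have hget : bd.getD row.toNat [] = bd[row.toNat] := List.getD_eq_getElem _ _ hlt
  rw [hget]
  refine h2 _ ?_
  have hlt2 : row.toNat < (bd.take N.toNat).length := by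
    rw [List.length_take]; omega
  have : (bd.take N.toNat)[row.toNat] = bd[row.toNat] := List.getElem_take
  rw [← this]
  exact List.getElem_mem _

-- ===== VERDICT (by name: the statement is the Claim_ definition above) =====
theorem get_max_killed_enemies_spec : Claim_equal_get_max_killed_enemies := by
  intro N M D ob _ hpre
  unfold Spec_get_max_killed_enemies get_max_killed_enemies get_max_killed_enemies_alt
  by_cases hM : M < 3
  · rw [if_pos hM, pvCombos_nil M hM]
    rfl
  · rw [if_neg hM]
    have hsim : ∀ ar, pvSimA N M D ob ar = pvSimC N M D (pvEnemies N M ob) ar := by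
      intro ar
      rcases hpre with h | h | ⟨h1, h2⟩
      · omega
      · exact pvSim_corr N M D ob ar (Or.inr h)
      · exact pvSim_corr N M D ob ar (Or.inl (pvPre_shape N M ob h1 h2))
    simp only [hsim]
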